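-- pv_equiv track=rewrite | github.com/yf591/competitive_programming | algorithms/math/number_theory.py | legendre_symbol
-- ===== SOURCE A (Python) =====
-- def legendre_symbol(a: int, p: int) -> int:
--     """
--     ルジャンドル記号 (a/p) を計算
--     p は奇素数
--
--     Args:
--         a: 整数
--         p: 奇素数
--
--     Returns:
--         1  (a が p を法としたときの二次剰余)
--         -1 (a が p を法としたときの非二次剰余)
--         0  (a が p で割り切れる場合)
--     """
--     a %= p
--     if a == 0:
--         return 0
--
--     if a == 1:
--         return 1
--
--     if a == 2:
--         # 2の場合は p mod 8 で決まる
--         if p % 8 == 1 or p % 8 == 7: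
--             return 1
--         return -1
--
--     if a % 2 == 0:
--         # 2に関する二次剰余の法則
--         return legendre_symbol(2, p) * legendre_symbol(a // 2, p)
--
--     if a % 4 == 3 and p % 4 == 3:
--         # 二次相互法則の特殊ケース
--         return -legendre_symbol(p, a)
--
--     # 二次相互法則の一般形
--     return legendre_symbol(p % a, a)
-- ===== SOURCE B (Python) =====
-- def legendre_symbol(a: int, p: int) -> int:
--     # Iterative: running sign instead of recursion (assumes p > 0, the function's domain)
--     a %= p
--     result = 1
--     while a > 1:
--         if a % 2 == 0:
--             if p % 8 not in (1, 7):
--                 result = -result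
--             a //= 2
--         else:
--             if a % 4 == 3 and p % 4 == 3:
--                 result = -result
--             a, p = p % a, a
--     return 0 if a == 0 else result
-- ===== Notes on version B (the rewrite author's own statement) =====
-- stated objective: simpler
-- what changed: Replaces A's multiplicative recursion (with separate base cases and recursive factors legendre(2,p)*legendre(a//2,p)) by a single iterative loop that maintains a running sign and reduces (a,p) in place; Pre_ restricts to p > 0, the function's documented domain (p an odd prime).
-- outside the precondition, e.g. on legendre_symbol(3, -7): A returns 0, B returns 1; on legendre_symbol(5, -3): A returns 0, B returns 1; on legendre_symbol(2, -4): A raises RecursionError, B returns 1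
import Mathlib
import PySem

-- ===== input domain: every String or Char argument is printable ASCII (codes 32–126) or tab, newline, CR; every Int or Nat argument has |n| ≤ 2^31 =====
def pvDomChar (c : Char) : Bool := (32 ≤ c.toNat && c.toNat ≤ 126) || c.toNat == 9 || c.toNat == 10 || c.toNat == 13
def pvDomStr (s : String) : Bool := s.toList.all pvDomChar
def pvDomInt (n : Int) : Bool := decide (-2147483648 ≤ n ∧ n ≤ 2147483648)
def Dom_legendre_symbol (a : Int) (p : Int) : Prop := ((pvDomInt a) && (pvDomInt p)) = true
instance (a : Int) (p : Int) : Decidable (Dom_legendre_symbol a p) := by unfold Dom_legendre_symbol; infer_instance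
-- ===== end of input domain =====

-- B replaces A's multiplicative recursion by one iterative loop with a running sign ("simpler");
-- Pre_ restricts to p > 0, the function's documented domain (p an odd prime).


-- ===== PORT A =====
-- A is general recursion that does not terminate on some inputs outside Pre_ (even p < 0),
-- so it is ported with a fuel parameter; the fuel passed below strictly exceeds the
-- recursion depth whenever p > 0 (proved in the main lemma).
def legendreFuel : Nat → Int → Int → Int
  | 0, _, _ => 0
  | Nat.succ n, a₀, p =>
    let a := PySem.Int.mod a₀ p          -- a %= p
    if a = 0 then 0
    else if a = 1 then 1
    else if a = 2 then
      (if PySem.Int.mod p 8 = 1 ∨ PySem.Int.mod p 8 = 7 then 1 else -1)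
    else if PySem.Int.mod a 2 = 0 then
      legendreFuel n 2 p * legendreFuel n (PySem.Int.floordiv a 2) p
    else if PySem.Int.mod a 4 = 3 ∧ PySem.Int.mod p 4 = 3 then
      - legendreFuel n p a
    else
      legendreFuel n (PySem.Int.mod p a) a

def legendre_symbol (a : Int) (p : Int) : Int :=
  legendreFuel ((PySem.Int.mod a p + p).toNat + 1) a p

-- ===== PORT B =====
-- the while-loop of Source B: state (result, a, p)
def lsLoop (result : Int) (a : Int) (p : Int) : Int :=
  if h : 1 < a then
    if PySem.Int.mod a 2 = 0 then
      lsLoop (if PySem.Int.mod p 8 = 1 ∨ PySem.Int.mod p 8 = 7 then result else -result)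
             (PySem.Int.floordiv a 2) p
    else
      lsLoop (if PySem.Int.mod a 4 = 3 ∧ PySem.Int.mod p 4 = 3 then -result else result)
             (PySem.Int.mod p a) a
  else if a = 0 then 0 else result
termination_by a.toNat
decreasing_by
  · have hd : PySem.Int.floordiv a 2 = a / 2 := PySem.Int.floordiv_eq_ediv_of_pos (by norm_num)
    rw [hd]; omega
  · have h0 : (0:Int) < a := by omega
    have h1 := PySem.Int.mod_nonneg p h0
    have h2 := PySem.Int.mod_lt p h0
    omega

def legendre_symbol_alt (a : Int) (p : Int) : Int :=
  lsLoop 1 (PySem.Int.mod a p) p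

-- ===== PRECONDITION & SPEC =====
-- Pre_ restricts to p > 0, the function's documented domain (p is "an odd prime"): A raises
-- ZeroDivisionError at p = 0 and RecursionError for even p < 0 on even nonzero residues, and
-- B's loop does not reproduce the accidental values A returns on the remaining negative p.
def Pre_legendre_symbol (a : Int) (p : Int) : Prop := 0 < p
instance (a : Int) (p : Int) : Decidable (Pre_legendre_symbol a p) := by unfold Pre_legendre_symbol; infer_instance
def pvWitness_legendre_symbol : Int × Int := (3, 7)

def Spec_legendre_symbol (a : Int) (p : Int) (out : Int) : Prop := out = legendre_symbol_alt a p
instance (a : Int) (p : Int) (out : Int) : Decidable (Spec_legendre_symbol a p out) := by unfold Spec_legendre_symbol; infer_instance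

-- ===== CLAIM (what is proved, stated in full; the proofs are below) =====
def Claim_equal_legendre_symbol : Prop := ∀ (a : Int) (p : Int), Dom_legendre_symbol a p → Pre_legendre_symbol a p → Spec_legendre_symbol a p (legendre_symbol a p)
-- ===== LEMMAS AND PROOFS =====

lemma pvmod_eq_of_range {x p : Int} (h0 : 0 ≤ x) (h1 : x < p) : PySem.Int.mod x p = x := by
  rw [PySem.Int.mod_eq_emod_of_pos (by omega)]
  exact Int.emod_eq_of_lt h0 h1

lemma lsLoop_le_one {a : Int} (h : ¬ 1 < a) (r p : Int) :
    lsLoop r a p = if a = 0 then 0 else r := by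
  rw [lsLoop.eq_def, dif_neg h]

lemma lsLoop_even {a p : Int} (h1 : 1 < a) (h2 : PySem.Int.mod a 2 = 0) (r : Int) :
    lsLoop r a p =
      lsLoop (if PySem.Int.mod p 8 = 1 ∨ PySem.Int.mod p 8 = 7 then r else -r)
             (PySem.Int.floordiv a 2) p := by
  rw [lsLoop.eq_def, dif_pos h1, if_pos h2]

lemma lsLoop_odd {a p : Int} (h1 : 1 < a) (h2 : ¬ PySem.Int.mod a 2 = 0) (r : Int) :
    lsLoop r a p =
      lsLoop (if PySem.Int.mod a 4 = 3 ∧ PySem.Int.mod p 4 = 3 then -r else r)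
             (PySem.Int.mod p a) a := by
  rw [lsLoop.eq_def, dif_pos h1, if_neg h2]

-- the accumulated sign factors out of the loop
lemma ls_mul_aux : ∀ (n : Nat) (r a p : Int), a.toNat ≤ n → lsLoop r a p = r * lsLoop 1 a p := by
  intro n
  induction n with
  | zero =>
    intro r a p ha
    have h1 : ¬ 1 < a := by omega
    rw [lsLoop_le_one h1, lsLoop_le_one h1]
    split_ifs <;> ring
  | succ k IH =>
    intro r a p ha
    by_cases h1 : 1 < a
    · by_cases h2 : PySem.Int.mod a 2 = 0
      · rw [lsLoop_even h1 h2, lsLoop_even h1 h2]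
        have hd : PySem.Int.floordiv a 2 = a / 2 := PySem.Int.floordiv_eq_ediv_of_pos (by norm_num)
        have hlt : (PySem.Int.floordiv a 2).toNat ≤ k := by rw [hd]; omega
        split_ifs with hc
        · exact IH _ _ _ hlt
        · rw [IH (-r) _ _ hlt, IH (-1) _ _ hlt]; ring
      · have h0 : (0:Int) < a := by omega
        have hb1 := PySem.Int.mod_nonneg p h0
        have hb2 := PySem.Int.mod_lt p h0
        rw [lsLoop_odd h1 h2, lsLoop_odd h1 h2]
        have hlt : (PySem.Int.mod p a).toNat ≤ k := by omega
        split_ifs with hc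
        · rw [IH (-r) _ _ hlt, IH (-1) _ _ hlt]; ring
        · exact IH _ _ _ hlt
    · rw [lsLoop_le_one h1, lsLoop_le_one h1]
      split_ifs <;> ring

lemma ls_mul (r a p : Int) : lsLoop r a p = r * lsLoop 1 a p :=
  ls_mul_aux a.toNat r a p le_rfl

lemma main_lemma : ∀ (n : Nat) (a p : Int), 0 < p → (PySem.Int.mod a p + p).toNat < n →
    legendreFuel n a p = lsLoop 1 (PySem.Int.mod a p) p := by
  intro n
  induction n with
  | zero => intro a p hp hn; omega
  | succ k IH =>
    intro a p hp hn
    have hm0 : 0 ≤ PySem.Int.mod a p := PySem.Int.mod_nonneg a hp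
    have hmp : PySem.Int.mod a p < p := PySem.Int.mod_lt a hp
    simp only [legendreFuel]
    set m := PySem.Int.mod a p with hm
    by_cases e0 : m = 0
    · rw [if_pos e0, e0, lsLoop_le_one (by norm_num)]; simp
    rw [if_neg e0]
    by_cases e1 : m = 1
    · rw [if_pos e1, e1, lsLoop_le_one (by norm_num)]; norm_num
    rw [if_neg e1]
    by_cases e2 : m = 2
    · rw [if_pos e2, e2,
        lsLoop_even (by norm_num) (by rw [PySem.Int.mod_eq_emod_of_pos (by norm_num)]; decide)]
      have : PySem.Int.floordiv (2:Int) 2 = 1 := by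
        rw [PySem.Int.floordiv_eq_ediv_of_pos (by norm_num)]; decide
      rw [this, lsLoop_le_one (by norm_num)]
      norm_num
    rw [if_neg e2]
    have hm3 : 3 ≤ m := by omega
    by_cases ev : PySem.Int.mod m 2 = 0
    · -- even residue, m ≥ 4, hence p ≥ 5
      rw [if_pos ev]
      have hev : m % 2 = 0 := by rwa [PySem.Int.mod_eq_emod_of_pos (by norm_num)] at ev
      have hm4 : 4 ≤ m := by omega
      have hp5 : 5 ≤ p := by omega
      have hd : PySem.Int.floordiv m 2 = m / 2 := PySem.Int.floordiv_eq_ediv_of_pos (by norm_num)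
      -- factor legendreFuel k 2 p
      have h2p : PySem.Int.mod (2:Int) p = 2 := pvmod_eq_of_range (by norm_num) (by omega)
      have f2 : legendreFuel k 2 p = lsLoop 1 2 p := by
        have := IH 2 p hp (by rw [h2p]; omega)
        rwa [h2p] at this
      have f2' : lsLoop 1 (2:Int) p =
          (if PySem.Int.mod p 8 = 1 ∨ PySem.Int.mod p 8 = 7 then 1 else -1) := by
        rw [lsLoop_even (by norm_num) (by rw [PySem.Int.mod_eq_emod_of_pos (by norm_num)]; decide)]
        have : PySem.Int.floordiv (2:Int) 2 = 1 := by
          rw [PySem.Int.floordiv_eq_ediv_of_pos (by norm_num)]; decide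
        rw [this, lsLoop_le_one (by norm_num)]
        norm_num
      -- factor legendreFuel k (m/2) p
      have hhalf : PySem.Int.mod (PySem.Int.floordiv m 2) p = PySem.Int.floordiv m 2 := by
        rw [hd]; exact pvmod_eq_of_range (by omega) (by omega)
      have fh : legendreFuel k (PySem.Int.floordiv m 2) p
          = lsLoop 1 (PySem.Int.floordiv m 2) p := by
        have := IH (PySem.Int.floordiv m 2) p hp (by rw [hhalf, hd]; omega)
        rwa [hhalf] at this
      rw [f2, fh, f2', lsLoop_even (by omega) ev,
        ls_mul (if PySem.Int.mod p 8 = 1 ∨ PySem.Int.mod p 8 = 7 then 1 else -1)]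
    rw [if_neg ev]
    have hodd : ¬ m % 2 = 0 := by rwa [PySem.Int.mod_eq_emod_of_pos (by norm_num)] at ev
    have hm0' : (0:Int) < m := by omega
    have hr0 := PySem.Int.mod_nonneg p hm0'
    have hr1 := PySem.Int.mod_lt p hm0'
    have hidem : PySem.Int.mod (PySem.Int.mod p m) m = PySem.Int.mod p m :=
      pvmod_eq_of_range hr0 hr1
    by_cases fl : PySem.Int.mod m 4 = 3 ∧ PySem.Int.mod p 4 = 3
    · rw [if_pos fl]
      have frec : legendreFuel k p m = lsLoop 1 (PySem.Int.mod p m) m :=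
        IH p m hm0' (by omega)
      rw [frec, lsLoop_odd (by omega) ev, if_pos fl, ls_mul (-1)]
      ring
    · rw [if_neg fl]
      have frec : legendreFuel k (PySem.Int.mod p m) m = lsLoop 1 (PySem.Int.mod p m) m := by
        have := IH (PySem.Int.mod p m) m hm0' (by rw [hidem]; omega)
        rwa [hidem] at this
      rw [lsLoop_odd (by omega) ev, if_neg fl]
      exact frec

-- ===== VERDICT (by name: the statement is the Claim_ definition above) =====
theorem legendre_symbol_spec : Claim_equal_legendre_symbol := by
  intro a p _ hpre
  unfold Spec_legendre_symbol legendre_symbol legendre_symbol_alt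
  exact main_lemma _ a p hpre (by omega)
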